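-- pv_equiv track=rewrite | github.com/Ayush79-u/ai-data-assistant | src/nl_data_assistant/nlp/local_parser.py | resolve_insert_columns
-- ===== SOURCE A (Python) =====
-- from typing import Any
--
-- TABLE_PROFILES = {
--     "student": ["name", "cgpa"],
--     "students": ["name", "cgpa"],
--     "expense": ["month", "category", "amount"],
--     "expenses": ["month", "category", "amount"],
-- }
--
-- def resolve_insert_columns(
--     table_name: str | None,
--     explicit_values: dict[str, Any],
--     random_fields: list[str],
-- ) -> list[str]:
--     columns = list(explicit_values.keys())
--     for field in random_fields:
--         if field not in columns:
--             columns.append(field)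
--
--     for profile_column in infer_default_columns(table_name):
--         if profile_column not in columns:
--             columns.append(profile_column)
--
--     return columns or ["name"]
--
-- def infer_default_columns(table_name: str | None) -> list[str]:
--     if not table_name:
--         return ["name"]
--     return TABLE_PROFILES.get(table_name, TABLE_PROFILES.get(table_name.rstrip("s"), ["name"]))
-- ===== SOURCE B (Python) =====
-- from typing import Any
--
-- TABLE_PROFILES = {
--     "student": ["name", "cgpa"],
--     "students": ["name", "cgpa"],
--     "expense": ["month", "category", "amount"],
--     "expenses": ["month", "category", "amount"],
-- }
--
-- def infer_default_columns(table_name: str | None) -> list[str]: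
--     if not table_name:
--         return ["name"]
--     return TABLE_PROFILES.get(table_name, TABLE_PROFILES.get(table_name.rstrip("s"), ["name"]))
--
-- def resolve_insert_columns(
--     table_name: str | None,
--     explicit_values: dict[str, Any],
--     random_fields: list[str],
-- ) -> list[str]:
--     stream = list(explicit_values) + list(random_fields) + infer_default_columns(table_name)
--     cols: list[str] = []
--     while stream:
--         head = stream[0]
--         cols.append(head)
--         # delete every later occurrence of head; the stream shrinks each round
--         stream = [x for x in stream[1:] if x != head]
--     return cols or ["name"]
-- ===== Notes on version B (the rewrite author's own statement) =====
-- stated objective: alternative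
-- what changed: A grows a column list with three membership-check-and-append loops; B concatenates the three sources once and dedups by a recursive take-head-then-delete-its-later-occurrences pass over the stream, with no membership test against the output.
import Mathlib
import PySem

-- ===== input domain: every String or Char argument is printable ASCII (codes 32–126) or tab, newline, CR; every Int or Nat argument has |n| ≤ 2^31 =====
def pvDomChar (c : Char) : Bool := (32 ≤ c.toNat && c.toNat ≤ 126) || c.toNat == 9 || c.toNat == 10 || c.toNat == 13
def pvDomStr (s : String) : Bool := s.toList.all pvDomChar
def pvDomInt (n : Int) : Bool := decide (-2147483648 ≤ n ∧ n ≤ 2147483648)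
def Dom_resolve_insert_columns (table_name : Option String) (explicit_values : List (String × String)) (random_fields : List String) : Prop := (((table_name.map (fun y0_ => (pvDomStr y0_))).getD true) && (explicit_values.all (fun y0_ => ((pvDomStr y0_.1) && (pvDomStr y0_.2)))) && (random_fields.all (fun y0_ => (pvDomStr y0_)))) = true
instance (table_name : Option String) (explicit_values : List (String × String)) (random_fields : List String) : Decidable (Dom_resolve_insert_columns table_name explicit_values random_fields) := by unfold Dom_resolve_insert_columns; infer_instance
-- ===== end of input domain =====

-- B dedups the concatenated sources by a recursive take-head-then-delete-later-occurrences pass instead of A's three membership-check-and-append loops (alternative; same behaviour).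


-- ===== PORT A =====
def TABLE_PROFILES : PySem.Dict String (List String) :=
  PySem.Dict.ofList [("student", ["name", "cgpa"]), ("students", ["name", "cgpa"]),
    ("expense", ["month", "category", "amount"]), ("expenses", ["month", "category", "amount"])]

-- s.rstrip(chars): drop trailing characters belonging to chars — exact for ASCII rstrip with a char set
def pyRstripChars (s : String) (chars : List Char) : String :=
  String.ofList ((s.toList.reverse.dropWhile (fun c => chars.contains c)).reverse)

def infer_default_columns (table_name : Option String) : List String :=
  match table_name with
  | none => ["name"]
  | some t =>
    if t = "" then ["name"]
    else TABLE_PROFILES.getD t (TABLE_PROFILES.getD (pyRstripChars t ['s']) ["name"])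

def resolve_insert_columns (table_name : Option String) (explicit_values : List (String × String)) (random_fields : List String) : List String :=
  let columns := (PySem.Dict.ofList explicit_values).keys
  let columns := random_fields.foldl
    (fun cols field => if cols.contains field then cols else cols ++ [field]) columns
  let columns := (infer_default_columns table_name).foldl
    (fun cols pc => if cols.contains pc then cols else cols ++ [pc]) columns
  if columns = [] then ["name"] else columns

-- ===== PORT B =====
-- B's while loop: take the stream's head, append it to cols, delete every later occurrence of it
def firstKeysLoop (cols : List String) : List String → List String
  | [] => cols
  | h :: t => firstKeysLoop (cols ++ [h]) (t.filter (fun x => x != h))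
termination_by xs => xs.length
decreasing_by
  simpa using Nat.lt_succ_of_le (List.length_filter_le _ _)

def resolve_insert_columns_alt (table_name : Option String) (explicit_values : List (String × String)) (random_fields : List String) : List String :=
  let stream := (PySem.Dict.ofList explicit_values).keys ++ random_fields ++ infer_default_columns table_name
  let cols := firstKeysLoop [] stream
  if cols = [] then ["name"] else cols

-- ===== PRECONDITION & SPEC =====
def Spec_resolve_insert_columns (table_name : Option String) (explicit_values : List (String × String)) (random_fields : List String) (out : List String) : Prop := out = resolve_insert_columns_alt table_name explicit_values random_fields
instance (table_name : Option String) (explicit_values : List (String × String)) (random_fields : List String) (out : List String) : Decidable (Spec_resolve_insert_columns table_name explicit_values random_fields out) := by unfold Spec_resolve_insert_columns; infer_instance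

-- ===== CLAIM (what is proved, stated in full; the proofs are below) =====
def Claim_equal_resolve_insert_columns : Prop := ∀ (table_name : Option String) (explicit_values : List (String × String)) (random_fields : List String), Dom_resolve_insert_columns table_name explicit_values random_fields → Spec_resolve_insert_columns table_name explicit_values random_fields (resolve_insert_columns table_name explicit_values random_fields)

-- ===== LEMMAS AND PROOFS =====

-- proof-only helper: the loop's result without its accumulator
def firstKeys : List String → List String
  | [] => []
  | h :: t => h :: firstKeys (t.filter (fun x => x != h))
termination_by xs => xs.length
decreasing_by
  simpa using Nat.lt_succ_of_le (List.length_filter_le _ _)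

theorem firstKeysLoop_eq : ∀ (s cols : List String), firstKeysLoop cols s = cols ++ firstKeys s
  | [], cols => by simp [firstKeysLoop, firstKeys]
  | h :: t, cols => by
    rw [firstKeysLoop, firstKeys, firstKeysLoop_eq (t.filter (fun x => x != h))]
    simp
termination_by s => s.length
decreasing_by
  simpa using Nat.lt_succ_of_le (List.length_filter_le _ _)

-- A's append-if-absent step IS PySem.Set.add
theorem step_eq_add :
    (fun (cols : List String) (x : String) => if cols.contains x then cols else cols ++ [x]) = PySem.Set.add := by
  funext cols x
  simp [PySem.Set.add]

-- A's accumulator loop computes exactly B's recursive dedup of the remaining stream (restricted to fresh elements)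
theorem foldl_add_eq_firstKeys (xs : List String) (acc : List String) :
    xs.foldl PySem.Set.add acc = acc ++ firstKeys (xs.filter (fun x => !acc.contains x)) := by
  induction xs generalizing acc with
  | nil => simp [firstKeys]
  | cons h t ih =>
    by_cases hm : h ∈ acc
    · simp only [List.foldl_cons]
      rw [show PySem.Set.add acc h = acc from by
        simp [PySem.Set.add, PySem.Set.contains, hm]]
      rw [ih, List.filter_cons]
      simp [hm]
    · simp only [List.foldl_cons]
      rw [show PySem.Set.add acc h = acc ++ [h] from by
        simp [PySem.Set.add, PySem.Set.contains, hm]]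
      rw [ih, List.filter_cons]
      simp only [List.contains_eq_mem, hm, decide_false, Bool.not_false, if_pos,
        firstKeys, List.filter_filter, List.append_assoc, List.cons_append, List.nil_append]
      congr 3
      apply List.filter_congr
      intro x _
      by_cases hx : x = h <;> simp [hx, hm]

-- ===== VERDICT (by name: the statement is the Claim_ definition above) =====
theorem resolve_insert_columns_spec : Claim_equal_resolve_insert_columns := by
  intro tn ev rf _
  unfold Spec_resolve_insert_columns resolve_insert_columns resolve_insert_columns_alt
  rw [step_eq_add]
  have hks : ((PySem.Dict.ofList ev).keys).foldl PySem.Set.add [] = (PySem.Dict.ofList ev).keys := by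
    simpa [PySem.Set.ofList] using PySem.Set.ofList_eq_self_of_nodup _ (PySem.Dict.nodup_keys_ofList ev)
  have h : ((infer_default_columns tn).foldl PySem.Set.add
        (rf.foldl PySem.Set.add ((PySem.Dict.ofList ev).keys)))
      = firstKeys ((PySem.Dict.ofList ev).keys ++ rf ++ infer_default_columns tn) := by
    have h0 := foldl_add_eq_firstKeys ((PySem.Dict.ofList ev).keys ++ rf ++ infer_default_columns tn) []
    rw [List.foldl_append, List.foldl_append, hks] at h0
    simpa using h0
  simp only [h, firstKeysLoop_eq, List.nil_append]
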